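-- pv_equiv track=rewrite | github.com/bashbash96/InterviewPreparation | LeetCode/googleOA.py | numOfSplit
-- ===== SOURCE A (Python) =====
-- import collections
--
-- def numOfSplit(S):
--     rightCount, leftCount = collections.Counter(S), collections.defaultdict(int)
--
--     res = 0
--     for i in range(len(S) - 1):
--         leftCount[S[i]] += 1
--         rightCount[S[i]] -= 1
--         if rightCount[S[i]] == 0:
--             del rightCount[S[i]]
--         if isEqual(leftCount, rightCount):
--             res += 1
--     return res
--
-- def isEqual(left, right):
--     if len(left) != len(right):
--         return False
--
--     for key in left:
--         if key not in right:
--             return False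
--
--     return True
-- ===== SOURCE B (Python) =====
-- def numOfSplit(S):
--     # Split sets are equal iff each half contains every distinct char of S
--     # (their union is always the full char set), so the valid split indices
--     # form the interval [maxFirstOccurrence, minLastOccurrence - 1].
--     if not S:
--         return 0
--     maxFirst = _lastNewIndex(S)
--     minLast = len(S) - 1 - _lastNewIndex(reversed(S))
--     return max(0, minLast - maxFirst)
--
--
-- def _lastNewIndex(chars):
--     # index at which the last previously-unseen character appears
--     seen = set()
--     idx = 0
--     for i, c in enumerate(chars):
--         if c not in seen:
--             seen.add(c)
--             idx = i
--     return idx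
-- ===== Notes on version B (the rewrite author's own statement) =====
-- stated objective: faster
-- what changed: A rescans the key sets of two counters at every split index (O(n*k)); B uses the fact that the two halves' char sets are equal iff both equal the full char set, so it just computes the max first-occurrence and min last-occurrence indices in two linear scans and returns max(0, minLast - maxFirst).
import Mathlib
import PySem

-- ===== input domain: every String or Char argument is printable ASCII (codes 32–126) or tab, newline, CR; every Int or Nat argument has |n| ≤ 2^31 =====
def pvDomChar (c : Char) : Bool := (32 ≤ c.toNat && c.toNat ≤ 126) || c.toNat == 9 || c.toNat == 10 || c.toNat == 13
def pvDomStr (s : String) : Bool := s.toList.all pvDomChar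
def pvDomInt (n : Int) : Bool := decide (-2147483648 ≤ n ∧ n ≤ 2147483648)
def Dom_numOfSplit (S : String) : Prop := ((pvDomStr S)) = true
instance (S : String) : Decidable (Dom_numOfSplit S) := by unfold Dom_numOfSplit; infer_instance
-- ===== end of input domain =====

-- B replaces A's per-split key-set comparison of two counters with a closed form:
-- the halves' char sets are equal iff both equal the full char set, so the answer is
-- max(0, minLastOccurrence - maxFirstOccurrence), computed in two linear scans (faster).


-- ===== PORT A =====
-- isEqual(left, right): size check, then the for-loop with early 'return False' as a flag fold
def isEqualDict (left right : PySem.Dict Char Int) : Bool :=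
  if left.size ≠ right.size then false
  else left.keys.foldl (fun ok key => if !(right.contains key) then false else ok) true

-- one iteration of A's loop body (c = S[i]); rightCount[S[i]] is always a present key before
-- the decrement (the suffix still contains S[i]), so Counter.__missing__ never fires and
-- 'rightCount[c] -= 1' is exactly 'modify c 0 (· - 1)'
def stepA (st : PySem.Dict Char Int × PySem.Dict Char Int × Int) (c : Char) :
    PySem.Dict Char Int × PySem.Dict Char Int × Int :=
  let left := st.2.1.modify c 0 (· + 1)
  let right := st.1.modify c 0 (· - 1)
  let right := if right.getD c 0 == 0 then right.erase c else right
  let res := if isEqualDict left right then st.2.2 + 1 else st.2.2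
  (right, left, res)

def numOfSplit (S : String) : Int :=
  let cs := S.toList
  -- for i in range(len(S) - 1): ...  (S[i] never raises: 0 ≤ i < len(S), so pyGetD's
  -- default ' ' is never consulted)
  ((PySem.List.pyRange 0 (PySem.Str.len S - 1) 1).foldl
      (fun st i => stepA st (PySem.List.pyGetD cs i ' '))
      (PySem.Dict.counter cs, PySem.Dict.empty, (0 : Int))).2.2

-- ===== PORT B =====
-- _lastNewIndex(chars): index at which the last previously-unseen character appears
def lastNewIdx (cs : List Char) : Int :=
  ((PySem.List.enumerate cs 0).foldl
      (fun (st : PySem.Set Char × Int) p =>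
        if PySem.Set.contains st.1 p.2 then st else (PySem.Set.add st.1 p.2, p.1))
      (PySem.Set.empty, 0)).2

def numOfSplit_alt (S : String) : Int :=
  let cs := S.toList
  if cs.isEmpty then 0
  else
    let maxFirst := lastNewIdx cs
    let minLast := PySem.Str.len S - 1 - lastNewIdx cs.reverse
    max 0 (minLast - maxFirst)

-- ===== PRECONDITION & SPEC =====
def Spec_numOfSplit (S : String) (out : Int) : Prop := out = numOfSplit_alt S
instance (S : String) (out : Int) : Decidable (Spec_numOfSplit S out) := by unfold Spec_numOfSplit; infer_instance

-- ===== CLAIM (what is proved, stated in full; the proofs are below) =====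
def Claim_equal_numOfSplit : Prop := ∀ (S : String), Dom_numOfSplit S → Spec_numOfSplit S (numOfSplit S)

-- ===== LEMMAS AND PROOFS =====

-- the (decidable) split condition at cut position k: both halves have the same char set
def sameB (cs : List Char) (k : Nat) : Bool :=
  (cs.take k).all (fun x => (cs.drop k).contains x) &&
  (cs.drop k).all (fun x => (cs.take k).contains x)

theorem sameB_iff (cs : List Char) (k : Nat) :
    sameB cs k = true ↔ (∀ x, x ∈ cs.take k ↔ x ∈ cs.drop k) := by
  simp only [sameB, Bool.and_eq_true, List.all_eq_true, List.contains_iff_mem]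
  exact ⟨fun ⟨h1, h2⟩ x => ⟨fun hx => h1 x hx, fun hx => h2 x hx⟩,
    fun h => ⟨fun x hx => (h x).1 hx, fun x hx => (h x).2 hx⟩⟩

theorem mem_take_or_drop (cs : List Char) (k : Nat) {c : Char} (hc : c ∈ cs) :
    c ∈ cs.take k ∨ c ∈ cs.drop k := by
  rw [← List.take_append_drop k cs] at hc
  exact List.mem_append.1 hc

-- the halves have the same char set iff each contains every char of cs
theorem sameB_iff_full (cs : List Char) (k : Nat) :
    sameB cs k = true ↔ (∀ c ∈ cs, c ∈ cs.take k) ∧ (∀ c ∈ cs, c ∈ cs.drop k) := by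
  rw [sameB_iff]
  constructor
  · intro h
    refine ⟨fun c hc => ?_, fun c hc => ?_⟩ <;> rcases mem_take_or_drop cs k hc with h1 | h1
    · exact h1
    · exact (h c).2 h1
    · exact (h c).1 h1
    · exact h1
  · rintro ⟨h1, h2⟩ x
    exact ⟨fun hx => h2 x (List.mem_of_mem_take hx), fun hx => h1 x (List.mem_of_mem_drop hx)⟩

theorem countP_range_interval (m a b : Nat) :
    (List.range m).countP (fun i => decide (a ≤ i ∧ i + 1 ≤ b)) = min b m - min a m := by
  induction m with
  | zero => simp
  | succ m ih =>
    rw [List.range_succ, List.countP_append, ih]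
    by_cases h : a ≤ m ∧ m + 1 ≤ b
    · simp only [List.countP_cons, List.countP_nil, h.1, h.2, and_self, decide_true,
        Nat.min_def]
      split_ifs <;> omega
    · have h0 : (List.countP (fun i => decide (a ≤ i ∧ i + 1 ≤ b)) [m]) = 0 := by
        simp only [List.countP_cons, List.countP_nil, decide_eq_true_eq]
        rw [if_neg h]
      rw [h0, Nat.min_def, Nat.min_def, Nat.min_def, Nat.min_def]
      split_ifs <;> omega

-- ---- A-side: dict lemmas not in the prelude (Dict.erase has none) ----

theorem get?_erase (d : PySem.Dict Char Int) (k x : Char) :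
    (d.erase k).get? x = if x = k then none else d.get? x := by
  rcases d with ⟨items⟩
  induction items with
  | nil => simp [PySem.Dict.erase, PySem.Dict.get?]
  | cons p rest ih =>
    simp only [PySem.Dict.erase, PySem.Dict.get?, List.filter_cons] at *
    by_cases hpk : p.1 = k
    · simp [hpk]
      split_ifs with hxk
      · subst hxk; simpa [hpk] using ih
      · simp only [List.find?_cons]
        have : (p.1 == x) = false := by
          simp only [beq_eq_false_iff_ne, ne_eq, hpk]
          exact fun hh => hxk hh.symm
        rw [this] at *
        simpa [hxk] using ih
    · have hb : (p.1 == k) = false := by simp [hpk]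
      simp only [hb, Bool.not_false, if_true]
      simp only [List.find?_cons]
      by_cases hpx : p.1 = x
      · have : (p.1 == x) = true := by simp [hpx]
        rw [this]
        have hxk : ¬ x = k := fun h => hpk (by rw [hpx, h])
        simp [hxk]
      · have : (p.1 == x) = false := by simp [hpx]
        rw [this]
        simpa using ih

theorem keys_erase (d : PySem.Dict Char Int) (k : Char) :
    (d.erase k).keys = d.keys.filter (fun x => !(x == k)) := by
  rcases d with ⟨items⟩
  simp only [PySem.Dict.erase, PySem.Dict.keys]
  induction items with
  | nil => rfl
  | cons p rest ih =>
    simp only [List.filter_cons, List.map_cons]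
    by_cases h : (p.1 == k) = true
    · simp [h, ih]
    · simp only [Bool.not_eq_true] at h
      simp [h, ih]

theorem nodup_keys_erase (d : PySem.Dict Char Int) (k : Char) (h : d.keys.Nodup) :
    (d.erase k).keys.Nodup := by
  rw [keys_erase]
  exact h.filter _

theorem getD_erase (d : PySem.Dict Char Int) (k x : Char) :
    (d.erase k).getD x 0 = if x = k then 0 else d.getD x 0 := by
  rw [PySem.Dict.getD_eq_get?_getD, get?_erase, PySem.Dict.getD_eq_get?_getD]
  split_ifs <;> rfl

theorem contains_erase (d : PySem.Dict Char Int) (k x : Char) :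
    (d.erase k).contains x = (!(x == k) && d.contains x) := by
  rw [PySem.Dict.contains_eq_isSome_get?, get?_erase, PySem.Dict.contains_eq_isSome_get?]
  by_cases h : x = k
  · simp [h]
  · simp [h]

-- isEqual compares the key sets: with nodup keys it is exactly set equality
theorem isEqualDict_iff (l r : PySem.Dict Char Int)
    (hl : l.keys.Nodup) (hr : r.keys.Nodup) :
    isEqualDict l r = true ↔ (∀ x, x ∈ l.keys ↔ x ∈ r.keys) := by
  unfold isEqualDict
  rw [PySem.List.foldl_if_false_eq]
  have hsize : l.size = l.keys.length := by simp [PySem.Dict.size, PySem.Dict.keys]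
  have hsize' : r.size = r.keys.length := by simp [PySem.Dict.size, PySem.Dict.keys]
  constructor
  · intro h
    have hs : l.size = r.size := by
      by_contra hh
      rw [if_pos hh] at h
      exact absurd h (by simp)
    rw [if_neg (by omega)] at h
    simp only [Bool.true_and, Bool.not_eq_eq_eq_not, Bool.not_true, List.any_eq_false,
      Bool.not_eq_false] at h
    have hsub : l.keys ⊆ r.keys := by
      intro x hx
      have := h x hx
      rwa [PySem.Dict.contains_iff_mem_keys] at this
    -- equal lengths + nodup + subset ⇒ same membership
    have hfin : l.keys.toFinset = r.keys.toFinset := by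
      apply Finset.eq_of_subset_of_card_le
      · intro x hx
        simp only [List.mem_toFinset] at *
        exact hsub hx
      · rw [List.toFinset_card_of_nodup hl, List.toFinset_card_of_nodup hr]
        omega
    intro x
    constructor <;> intro hx
    · have : x ∈ r.keys.toFinset := by rw [← hfin]; simpa using hx
      simpa using this
    · have : x ∈ l.keys.toFinset := by rw [hfin]; simpa using hx
      simpa using this
  · intro h
    have hperm : l.keys.toFinset = r.keys.toFinset := by
      ext x; simp [h x]
    have hlen : l.keys.length = r.keys.length := by
      rw [← List.toFinset_card_of_nodup hl, ← List.toFinset_card_of_nodup hr, hperm]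
    rw [if_neg (by omega)]
    simp only [Bool.true_and, Bool.not_eq_eq_eq_not, Bool.not_true, List.any_eq_false,
      Bool.not_eq_false]
    intro x hx
    rw [PySem.Dict.contains_iff_mem_keys]
    exact (h x).1 hx

-- A's loop invariant: after processing prefix `pre` (with `cs = pre ++ rest`) the state is
-- (suffix counter with zero entries removed, Counter(pre), number of valid cuts so far)
theorem stepA_invariant (cs : List Char) : ∀ pre rest, cs = pre ++ rest →
    (∀ x, (pre.foldl stepA (PySem.Dict.counter cs, PySem.Dict.empty, (0 : Int))).1.getD x 0
        = (rest.count x : Int)) ∧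
    (pre.foldl stepA (PySem.Dict.counter cs, PySem.Dict.empty, (0 : Int))).1.keys.Nodup ∧
    (∀ x, (pre.foldl stepA (PySem.Dict.counter cs, PySem.Dict.empty, (0 : Int))).1.contains x = true
        ↔ x ∈ rest) ∧
    (pre.foldl stepA (PySem.Dict.counter cs, PySem.Dict.empty, (0 : Int))).2.1
        = PySem.Dict.counter pre ∧
    (pre.foldl stepA (PySem.Dict.counter cs, PySem.Dict.empty, (0 : Int))).2.2
        = ((List.range pre.length).countP (fun i => sameB cs (i + 1)) : Int) := by
  intro pre
  induction pre using List.reverseRecOn with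
  | nil =>
    intro rest hrest
    simp only [List.foldl_nil, List.nil_append] at *
    subst hrest
    refine ⟨fun x => ?_, PySem.Dict.nodup_keys_counter _, fun x => ?_, rfl, by simp⟩
    · rw [PySem.Dict.getD_counter]
    · rw [PySem.Dict.contains_counter, List.contains_iff_mem]
  | append_singleton pre c ih =>
    intro rest hrest
    have hrest' : cs = pre ++ (c :: rest) := by simpa using hrest
    obtain ⟨hgetD, hnodup, hcontains, hleft, hres⟩ := ih (c :: rest) hrest'
    rw [List.foldl_append, List.foldl_cons, List.foldl_nil]
    set st := pre.foldl stepA (PySem.Dict.counter cs, PySem.Dict.empty, (0 : Int)) with hst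
    show _ ∧ _ ∧ _ ∧ _ ∧ _
    -- unfold stepA once
    rw [stepA]
    simp only []
    -- facts about the decremented right counter
    have hgetD1 : ∀ x, (st.1.modify c 0 (· - 1)).getD x 0 = (rest.count x : Int) := by
      intro x
      rw [PySem.Dict.getD_modify]
      split_ifs with hxc
      · subst hxc; rw [hgetD]; simp [List.count_cons]
      · rw [hgetD]
        have : ¬c = x := fun h => hxc h.symm
        simp [List.count_cons, this]
    have hcont1 : ∀ x, (st.1.modify c 0 (· - 1)).contains x = true ↔ x ∈ c :: rest := by
      intro x
      rw [PySem.Dict.contains_modify]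
      simp only [Bool.or_eq_true, beq_iff_eq, List.mem_cons]
      rw [hcontains]
      simp only [List.mem_cons]
      tauto
    have hnodup1 : (st.1.modify c 0 (· - 1)).keys.Nodup := by
      rw [PySem.Dict.keys_modify]
      exact PySem.Dict.nodup_keys_insert _ _ _ hnodup
    -- the (possibly erased) new right counter, by cases on whether c still occurs in rest
    set right1 := st.1.modify c 0 (· - 1) with hr1
    set right2 := if right1.getD c 0 == 0 then right1.erase c else right1 with hr2
    have hgetD2 : ∀ x, right2.getD x 0 = (rest.count x : Int) := by
      intro x
      rw [hr2]
      split_ifs with hz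
      · rw [getD_erase]
        split_ifs with hxc
        · have h0 := hgetD1 c
          simp only [beq_iff_eq] at hz
          rw [h0] at hz
          rw [hxc]
          omega
        · exact hgetD1 x
      · exact hgetD1 x
    have hcnotin : right1.getD c 0 == 0 ↔ c ∉ rest := by
      rw [hgetD1 c]
      simp [List.count_eq_zero]
    have hcont2 : ∀ x, right2.contains x = true ↔ x ∈ rest := by
      intro x
      rw [hr2]
      split_ifs with hz
      · have hcr : c ∉ rest := hcnotin.1 (by simpa using hz)
        rw [contains_erase]
        simp only [Bool.and_eq_true, Bool.not_eq_eq_eq_not, Bool.not_true, beq_eq_false_iff_ne,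
          ne_eq]
        rw [hcont1]
        simp only [List.mem_cons]
        constructor
        · rintro ⟨hne, h1 | h1⟩
          · exact absurd h1 hne
          · exact h1
        · intro hx
          exact ⟨fun hh => hcr (hh ▸ hx), Or.inr hx⟩
      · have hcr : c ∈ rest := by
          by_contra hcc
          exact hz (hcnotin.2 hcc)
        rw [hcont1]
        simp only [List.mem_cons]
        constructor
        · rintro (h1 | h1)
          · exact h1 ▸ hcr
          · exact h1
        · exact Or.inr
    have hnodup2 : right2.keys.Nodup := by
      rw [hr2]
      split_ifs with hz
      · exact nodup_keys_erase _ _ hnodup1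
      · exact hnodup1
    -- the new left counter
    have hleft2 : st.2.1.modify c 0 (· + 1) = PySem.Dict.counter (pre ++ [c]) := by
      rw [hleft, PySem.Dict.counter_append_singleton]
    -- the comparison equals the split condition at cut pre.length + 1
    have hkeq : (isEqualDict (st.2.1.modify c 0 (· + 1)) right2 = true)
        ↔ sameB cs (pre.length + 1) = true := by
      rw [hleft2]
      rw [isEqualDict_iff _ _ (PySem.Dict.nodup_keys_counter _) hnodup2, sameB_iff]
      have htake : cs.take (pre.length + 1) = pre ++ [c] := by
        rw [hrest]
        exact List.take_left' (by simp)
      have hdrop : cs.drop (pre.length + 1) = rest := by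
        rw [hrest]
        exact List.drop_left' (by simp)
      rw [htake, hdrop]
      constructor
      · intro h x
        have hx := h x
        rw [PySem.Dict.keys_counter, PySem.Set.mem_ofList, ← PySem.Dict.contains_iff_mem_keys,
          hcont2] at hx
        exact hx
      · intro h x
        rw [PySem.Dict.keys_counter, PySem.Set.mem_ofList, ← PySem.Dict.contains_iff_mem_keys,
          hcont2]
        exact h x
    refine ⟨hgetD2, hnodup2, hcont2, hleft2, ?_⟩
    -- the count
    rw [hres, List.length_append, List.length_singleton, List.range_succ, List.countP_append]
    have hcp : (List.countP (fun i => sameB cs (i + 1)) [pre.length] : Int)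
        = if isEqualDict (st.2.1.modify c 0 (· + 1)) right2 then 1 else 0 := by
      simp only [List.countP_cons, List.countP_nil]
      by_cases hb : sameB cs (pre.length + 1) = true
      · rw [hb, if_pos (hkeq.2 hb)]
        rfl
      · rw [if_neg (fun hh => hb (hkeq.1 hh))]
        simp only [Bool.not_eq_true] at hb
        rw [hb]
        rfl
    push_cast
    rw [hcp]
    split_ifs <;> push_cast <;> omega

-- for-loop over range(m) reading S[i] = fold over the first m characters
theorem foldl_pyRange_take {β : Type} (xs : List Char) (f : β → Char → β) (st : β)
    (m : Nat) (h : m ≤ xs.length) :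
    (PySem.List.pyRange 0 (m : Int) 1).foldl (fun acc i => f acc (PySem.List.pyGetD xs i ' ')) st
      = (xs.take m).foldl f st := by
  induction m generalizing st with
  | zero => simp
  | succ m ih =>
    have hcast : ((m + 1 : Nat) : Int) = (m : Int) + 1 := by push_cast; ring
    rw [hcast, PySem.List.pyRange_one_succ_right (by omega), List.foldl_append,
      List.take_succ, List.foldl_append, ih st (by omega)]
    have hm : m < xs.length := by omega
    simp [PySem.List.pyGetD_natCast, List.getD, List.getElem?_eq_getElem hm]

-- A counts exactly the cut positions k = i+1 whose halves share the char set
theorem A_eq_countP (S : String) :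
    numOfSplit S =
      ((List.range (S.toList.length - 1)).countP (fun i => sameB S.toList (i + 1)) : Int) := by
  simp only [numOfSplit, PySem.Str.len_eq]
  by_cases h : S.toList = []
  · rw [h]
    simp [PySem.List.pyRange_one]
  · have hn : 1 ≤ S.toList.length := List.length_pos_iff.2 h
    rw [show ((S.toList.length : Int) - 1) = ((S.toList.length - 1 : Nat) : Int) by omega]
    rw [foldl_pyRange_take _ _ _ _ (by omega)]
    obtain ⟨-, -, -, -, hres⟩ := stepA_invariant S.toList (S.toList.take (S.toList.length - 1))
      (S.toList.drop (S.toList.length - 1)) (List.take_append_drop _ _).symm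
    rw [hres, List.length_take]
    have hmin : min (S.toList.length - 1) S.toList.length = S.toList.length - 1 := by omega
    rw [hmin]

-- ---- B-side ----

-- the fold of _lastNewIndex: seen = set of chars so far, idx = last first-occurrence index;
-- idx characterises exactly the prefix lengths that contain every char
theorem lastNewIdx_inv (cs : List Char) (h : cs ≠ []) :
    ((PySem.List.enumerate cs 0).foldl
      (fun (st : PySem.Set Char × Int) p =>
        if PySem.Set.contains st.1 p.2 then st else (PySem.Set.add st.1 p.2, p.1))
      (PySem.Set.empty, 0)).1 = PySem.Set.ofList cs ∧
    ∃ m : Nat, ((PySem.List.enumerate cs 0).foldl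
      (fun (st : PySem.Set Char × Int) p =>
        if PySem.Set.contains st.1 p.2 then st else (PySem.Set.add st.1 p.2, p.1))
      (PySem.Set.empty, 0)).2 = (m : Int) ∧ m < cs.length ∧
      ∀ k : Nat, ((∀ c ∈ cs, c ∈ cs.take k) ↔ m < k) := by
  induction cs using List.reverseRecOn with
  | nil => exact absurd rfl h
  | append_singleton ys c ih =>
    rw [PySem.List.enumerate_append, List.foldl_append]
    by_cases hys : ys = []
    · subst hys
      simp only [PySem.List.enumerate_nil, List.foldl_nil, List.nil_append]
      simp only [PySem.List.enumerate_cons, PySem.List.enumerate_nil, List.foldl_cons,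
        List.foldl_nil]
      have hc : PySem.Set.contains (PySem.Set.empty : PySem.Set Char) c = false := rfl
      rw [hc]
      refine ⟨rfl, 0, by norm_num, by norm_num, fun k => ?_⟩
      cases k with
      | zero => simp
      | succ k => simp
    · obtain ⟨hfst, m, hm, hmlt, hiff⟩ := ih hys
      simp only [PySem.List.enumerate_cons, PySem.List.enumerate_nil, List.foldl_cons,
        List.foldl_nil, hfst]
      have hof : PySem.Set.ofList (ys ++ [c]) = PySem.Set.add (PySem.Set.ofList ys) c := by
        rw [PySem.Set.ofList_eq_foldl, PySem.Set.ofList_eq_foldl, List.foldl_append,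
          List.foldl_cons, List.foldl_nil]
      have hcontains : PySem.Set.contains (PySem.Set.ofList ys) c = decide (c ∈ ys) := by
        simp [PySem.Set.contains, List.contains_iff_mem, PySem.Set.mem_ofList]
      by_cases hcy : c ∈ ys
      · rw [hcontains, decide_eq_true hcy, if_pos rfl]
        refine ⟨?_, m, hm, by simp; omega, fun k => ?_⟩
        · -- ofList (ys ++ [c]) = ofList ys since c ∈ ys
          rw [hfst, hof, PySem.Set.add, hcontains, decide_eq_true hcy, if_pos rfl]
        · constructor
          · intro H
            by_cases hk : k ≤ ys.length
            · refine (hiff k).1 (fun x hx => ?_)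
              have := H x (List.mem_append.2 (Or.inl hx))
              rwa [List.take_append_of_le_length hk] at this
            · omega
          · intro hmk x hx
            have hys' : ∀ x ∈ ys, x ∈ ys.take k := (hiff k).2 hmk
            have hx' : x ∈ ys := by
              rcases List.mem_append.1 hx with h1 | h1
              · exact h1
              · rw [List.mem_singleton.1 h1]; exact hcy
            have : x ∈ ys.take k := hys' x hx'
            rw [List.take_append]
            exact List.mem_append.2 (Or.inl this)
      · rw [hcontains, decide_eq_false hcy, if_neg (by simp)]
        refine ⟨?_, ys.length, by simp, by simp, fun k => ?_⟩
        · rw [hof, PySem.Set.ofList_eq_foldl]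
        · constructor
          · intro H
            by_contra hk
            push_neg at hk
            have hc' := H c (List.mem_append.2 (Or.inr (List.mem_singleton.2 rfl)))
            rw [List.take_append_of_le_length hk] at hc'
            exact hcy (List.mem_of_mem_take hc')
          · intro hmk x hx
            rw [List.take_of_length_le (by simp; omega)]
            exact hx

theorem lastNewIdx_spec (cs : List Char) (h : cs ≠ []) :
    ∃ m : Nat, lastNewIdx cs = (m : Int) ∧ m < cs.length ∧
      ∀ k : Nat, ((∀ c ∈ cs, c ∈ cs.take k) ↔ m < k) := by
  obtain ⟨-, m, hm, hlt, hiff⟩ := lastNewIdx_inv cs h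
  exact ⟨m, hm, hlt, hiff⟩

-- suffix chars through the reversed list
theorem allRight_iff (cs : List Char) (k : Nat) :
    (∀ c ∈ cs, c ∈ cs.drop k) ↔ (∀ c ∈ cs.reverse, c ∈ cs.reverse.take (cs.length - k)) := by
  have hd : cs.reverse.take (cs.length - k) = (cs.drop k).reverse := by
    rw [List.reverse_drop]
  rw [hd]
  constructor
  · intro h c hc
    rw [List.mem_reverse] at hc ⊢
    exact h c hc
  · intro h c hc
    have := h c (List.mem_reverse.2 hc)
    rwa [List.mem_reverse] at this

-- ===== VERDICT (by name: the statement is the Claim_ definition above) =====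
theorem numOfSplit_spec : Claim_equal_numOfSplit := by
  intro S _
  unfold Spec_numOfSplit
  rw [A_eq_countP]
  by_cases h : S.toList = []
  · simp [numOfSplit_alt, h]
  · obtain ⟨mf, hmf, hmflt, hf⟩ := lastNewIdx_spec S.toList h
    obtain ⟨mr, hmr, hmrlt, hr⟩ := lastNewIdx_spec S.toList.reverse (by simpa using h)
    rw [List.length_reverse] at hmrlt
    have hcong : (List.range (S.toList.length - 1)).countP (fun i => sameB S.toList (i + 1))
        = (List.range (S.toList.length - 1)).countP
            (fun i => decide (mf ≤ i ∧ i + 1 ≤ (S.toList.length - 1 - mr))) := by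
      apply List.countP_congr
      intro i hi
      rw [List.mem_range] at hi
      rw [sameB_iff_full, decide_eq_true_eq, hf (i + 1), allRight_iff, hr]
      omega
    rw [hcong, countP_range_interval]
    simp only [numOfSplit_alt, PySem.Str.len_eq, List.isEmpty_iff, h, if_false]
    rw [hmf, hmr]
    omega
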